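-- pv_equiv track=rewrite | github.com/LiuXiangrui/BCM-Net | Modules/Utils.py | calculate_decompression_order
-- ===== SOURCE A (Python) =====
-- GOP_SIZE = 8
--
-- def calculate_decompression_order(num_slices: int) -> list:
--     """
--     Calculate the decompression order of slices.
--     :param num_slices: number of slices.
--     :return slices_indices: decompression order of slices.
--     """
--     assert num_slices > 0
--     slices_indices = [0]
--
--     base = [8, 4, 2, 6, 1, 3, 5, 7]
--
--     num_gop = (num_slices - 1) // GOP_SIZE
--     for n in range(num_gop):
--         slices_indices += [i + n * GOP_SIZE for i in base]
--     start_idx = num_gop * GOP_SIZE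
--     for i in base:
--         if start_idx + i >= num_slices:
--             continue
--         slices_indices.append(start_idx + i)
--     return slices_indices
-- ===== SOURCE B (Python) =====
-- GOP_SIZE = 8
--
--
-- def calculate_decompression_order(num_slices: int) -> list:
--     """
--     Calculate the decompression order of slices.
--     :param num_slices: number of slices.
--     :return slices_indices: decompression order of slices.
--     """
--     assert num_slices > 0
--     rank = {8: 0, 4: 1, 2: 2, 6: 3, 1: 4, 3: 5, 5: 6, 7: 7}
--
--     def priority(v):
--         gop = (v - 1) // GOP_SIZE
--         return gop * GOP_SIZE + rank[v - gop * GOP_SIZE]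
--
--     return [0] + sorted(range(1, num_slices), key=priority)
-- ===== Notes on version B (the rewrite author's own statement) =====
-- stated objective: alternative
-- what changed: A emits indices GOP by GOP with a full-GOP loop plus a separate filtered final-GOP loop; B enumerates all indices 1..num_slices-1 once and sorts them by a decode-priority key (GOP number * GOP_SIZE + rank of the offset in the base table).
-- outside the precondition, e.g. on calculate_decompression_order(0): A raises AssertionError, B raises AssertionError
import Mathlib
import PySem

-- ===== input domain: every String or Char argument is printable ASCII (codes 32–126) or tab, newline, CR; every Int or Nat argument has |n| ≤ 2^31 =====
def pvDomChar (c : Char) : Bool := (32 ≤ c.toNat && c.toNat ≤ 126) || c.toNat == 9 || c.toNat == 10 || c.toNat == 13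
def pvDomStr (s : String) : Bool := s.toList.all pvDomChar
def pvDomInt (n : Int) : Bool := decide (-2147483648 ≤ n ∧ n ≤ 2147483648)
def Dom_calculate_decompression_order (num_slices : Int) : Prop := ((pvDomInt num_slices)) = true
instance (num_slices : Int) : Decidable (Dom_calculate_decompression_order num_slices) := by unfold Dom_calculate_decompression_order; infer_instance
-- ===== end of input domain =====

-- B replaces A's two-phase emission (full-GOP loop plus a separate filtered final loop) by
-- enumerating all slice indices once and sorting them by a decode-priority key; alternative
-- decomposition, not faster.

-- ===== PORT A =====
def calculate_decompression_order (num_slices : Int) : List Int :=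
  -- assert num_slices > 0 → Pre_
  let base : List Int := [8, 4, 2, 6, 1, 3, 5, 7]
  let num_gop : Int := PySem.Int.floordiv (num_slices - 1) 8
  let slices_indices : List Int :=
    (PySem.List.pyRange 0 num_gop 1).foldl
      (fun acc n => acc ++ base.map (fun i => i + n * 8)) [0]
  let start_idx : Int := num_gop * 8
  base.foldl
    (fun acc i => if start_idx + i ≥ num_slices then acc else acc ++ [start_idx + i])
    slices_indices

-- ===== PORT B =====
-- the literal dict rank = {8:0, 4:1, 2:2, 6:3, 1:4, 3:5, 5:6, 7:7}
def pvRank : PySem.Dict Int Int :=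
  PySem.Dict.ofList [(8, 0), (4, 1), (2, 2), (6, 3), (1, 4), (3, 5), (5, 6), (7, 7)]

-- priority(v); Python's rank[...] lookup never misses for v ≥ 1 (the offset is in 1..8),
-- so Dict.getD with any default is exact on Pre_.
def pvPriority (v : Int) : Int :=
  let gop : Int := PySem.Int.floordiv (v - 1) 8
  gop * 8 + PySem.Dict.getD pvRank (v - gop * 8) 0

def calculate_decompression_order_alt (num_slices : Int) : List Int :=
  0 :: PySem.List.sorted (PySem.List.pyRange 1 num_slices 1) pvPriority false

-- ===== PRECONDITION & SPEC =====
-- Both programs assert num_slices > 0 and raise AssertionError otherwise; Pre_ excludes those inputs.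
def Pre_calculate_decompression_order (num_slices : Int) : Prop := 0 < num_slices
instance (num_slices : Int) : Decidable (Pre_calculate_decompression_order num_slices) := by
  unfold Pre_calculate_decompression_order; infer_instance
def pvWitness_calculate_decompression_order : Int := 12

def Spec_calculate_decompression_order (num_slices : Int) (out : List Int) : Prop :=
  out = calculate_decompression_order_alt num_slices
instance (num_slices : Int) (out : List Int) : Decidable (Spec_calculate_decompression_order num_slices out) := by
  unfold Spec_calculate_decompression_order; infer_instance

-- ===== CLAIM (what is proved, stated in full; the proofs are below) =====
def Claim_equal_calculate_decompression_order : Prop :=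
  ∀ (num_slices : Int), Dom_calculate_decompression_order num_slices →
    Pre_calculate_decompression_order num_slices →
    Spec_calculate_decompression_order num_slices (calculate_decompression_order num_slices)

-- ===== LEMMAS AND PROOFS =====

def pvBase : List Int := [8, 4, 2, 6, 1, 3, 5, 7]
def pvBlock (k : Int) : List Int := pvBase.map (fun i => i + k * 8)
def pvTail (num_slices : Int) : List Int :=
  let g : Int := PySem.Int.floordiv (num_slices - 1) 8
  ((PySem.List.pyRange 0 g 1).flatMap pvBlock)
    ++ (pvBase.filter (fun i => decide (g * 8 + i < num_slices))).map (fun i => g * 8 + i)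

lemma pvA_shape (n : Int) : calculate_decompression_order n = 0 :: pvTail n := by
  unfold calculate_decompression_order pvTail
  dsimp only
  rw [show (fun (acc : List Int) (i : Int) =>
        if PySem.Int.floordiv (n - 1) 8 * 8 + i ≥ n then acc
        else acc ++ [PySem.Int.floordiv (n - 1) 8 * 8 + i]) =
      (fun acc i => if ¬ (PySem.Int.floordiv (n - 1) 8 * 8 + i ≥ n) then
        acc ++ [PySem.Int.floordiv (n - 1) 8 * 8 + i] else acc) from by
    funext acc i; rw [ite_not]]
  rw [PySem.List.foldl_append_ite, PySem.List.foldl_append_eq_flatMap]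
  simp [pvBase]
  rfl

lemma pvRange8 (a : Int) :
    PySem.List.pyRange a (a + 8) 1 = [a, a+1, a+2, a+3, a+4, a+5, a+6, a+7] := by
  rw [PySem.List.pyRange_one_cons (by omega), PySem.List.pyRange_one_cons (by omega),
      PySem.List.pyRange_one_cons (by omega), PySem.List.pyRange_one_cons (by omega),
      PySem.List.pyRange_one_cons (by omega), PySem.List.pyRange_one_cons (by omega),
      PySem.List.pyRange_one_cons (by omega), PySem.List.pyRange_one_cons (by omega),
      PySem.List.pyRange_one_eq_nil (by omega)]
  norm_num
  omega

lemma pvPriority_eq (k i : Int) (h1 : 1 ≤ i) (h8 : i ≤ 8) :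
    pvPriority (i + k * 8) = k * 8 + PySem.Dict.getD pvRank i 0 := by
  unfold pvPriority
  dsimp only
  have hg : PySem.Int.floordiv (i + k * 8 - 1) 8 = k :=
    (PySem.Int.floordiv_eq_iff_of_pos (by norm_num)).2 ⟨by omega, by omega⟩
  rw [hg, show i + k * 8 - k * 8 = i from by ring]

lemma pvKeys_block (k : Int) :
    (pvBlock k).map pvPriority = [k*8, k*8+1, k*8+2, k*8+3, k*8+4, k*8+5, k*8+6, k*8+7] := by
  simp only [pvBlock, pvBase, List.map_cons, List.map_nil]
  norm_num [pvPriority_eq, pvRank, PySem.Dict.getD]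
  decide

lemma pvBase_perm : pvBase.Perm (PySem.List.pyRange 1 9 1) := by decide

lemma pvRange_map_shift (c a b : Int) :
    (PySem.List.pyRange a b 1).map (fun i => c + i) = PySem.List.pyRange (c+a) (c+b) 1 := by
  rw [PySem.List.pyRange_one, PySem.List.pyRange_one, List.map_map,
    show c + b - (c + a) = b - a from by ring]
  exact List.map_congr_left fun k _ => by simp [Function.comp]; ring

lemma pvBlock_perm (k : Int) :
    (pvBlock k).Perm (PySem.List.pyRange (k*8+1) (k*8+9) 1) := by
  have e : (PySem.List.pyRange 1 9 1).map (fun i => i + k*8) = PySem.List.pyRange (k*8+1) (k*8+9) 1 := by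
    rw [show (fun i => i + k*8) = (fun i => k*8 + i) from by funext i; ring, pvRange_map_shift]
  exact e ▸ (pvBase_perm.map _)

lemma pvFlat_perm (t : Nat) :
    ((PySem.List.pyRange 0 (t:Int) 1).flatMap pvBlock).Perm (PySem.List.pyRange 1 (8*(t:Int)+1) 1) := by
  induction t with
  | zero => simp [PySem.List.pyRange_one_eq_nil]
  | succ t ih =>
    rw [show ((t+1 : Nat) : Int) = (t : Int) + 1 from by push_cast; ring,
      PySem.List.pyRange_one_succ_right (by positivity), List.flatMap_append,
      PySem.List.pyRange_one_append 1 (8*(t:Int)+1) (8*((t:Int)+1)+1) (by omega) (by omega)]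
    simp only [List.flatMap_cons, List.flatMap_nil, List.append_nil]
    refine ih.append ?_
    have := pvBlock_perm (t : Int)
    rw [show (t:Int)*8+1 = 8*(t:Int)+1 from by ring, show (t:Int)*8+9 = 8*((t:Int)+1)+1 from by ring] at this
    exact this

lemma pvFilter_perm (n : Int) (g : Int) (h1 : g*8 ≤ n - 1) (h2 : n - 1 < (g+1)*8) :
    ((pvBase.filter (fun i => decide (g * 8 + i < n))).map (fun i => g * 8 + i)).Perm
      (PySem.List.pyRange (g*8+1) n 1) := by
  set p : Int → Bool := fun i => decide (g * 8 + i < n) with hp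
  have e1 : (PySem.List.pyRange 1 9 1).filter p = PySem.List.pyRange 1 (n - g*8) 1 := by
    rw [PySem.List.pyRange_one_append 1 (n - g*8) 9 (by omega) (by omega), List.filter_append,
      List.filter_eq_self.mpr, List.filter_eq_nil_iff.mpr, List.append_nil]
    · intro x hx
      rw [PySem.List.mem_pyRange_one] at hx
      simp [hp]; omega
    · intro x hx
      rw [PySem.List.mem_pyRange_one] at hx
      simp [hp]; omega
  have e2 : ((PySem.List.pyRange 1 9 1).filter p).map (fun i => g * 8 + i) =
      PySem.List.pyRange (g*8+1) n 1 := by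
    rw [e1, pvRange_map_shift, show g*8 + (n - g*8) = n from by ring]
  exact e2 ▸ ((pvBase_perm.filter p).map _)

lemma pvTail_perm (n : Int) (hn : 0 < n) :
    (pvTail n).Perm (PySem.List.pyRange 1 n 1) := by
  unfold pvTail
  dsimp only
  set g : Int := PySem.Int.floordiv (n - 1) 8 with hg
  have hb : g*8 ≤ n - 1 ∧ n - 1 < (g+1)*8 := (PySem.Int.floordiv_eq_iff_of_pos (by norm_num)).1 hg.symm
  have h0 : 0 ≤ g := by omega
  have htg : ((g.toNat : Nat) : Int) = g := Int.toNat_of_nonneg h0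
  rw [PySem.List.pyRange_one_append 1 (g*8+1) n (by omega) (by omega)]
  refine List.Perm.append ?_ (pvFilter_perm n g hb.1 hb.2)
  have := pvFlat_perm g.toNat
  rw [htg] at this
  rw [show g*8+1 = 8*g+1 from by ring]
  exact this

lemma pvKeys_base (k : Int) :
    pvBase.map (fun i => k*8 + PySem.Dict.getD pvRank i 0) =
      [k*8, k*8+1, k*8+2, k*8+3, k*8+4, k*8+5, k*8+6, k*8+7] := by
  simp only [pvBase, List.map_cons, List.map_nil]
  norm_num [pvRank, PySem.Dict.getD]
  decide

lemma pvKeys_flat (t : Nat) :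
    (((PySem.List.pyRange 0 (t:Int) 1).flatMap pvBlock).map pvPriority) =
      PySem.List.pyRange 0 (8*(t:Int)) 1 := by
  induction t with
  | zero => simp [PySem.List.pyRange_one_eq_nil]
  | succ t ih =>
    rw [show ((t+1 : Nat) : Int) = (t : Int) + 1 from by push_cast; ring,
      PySem.List.pyRange_one_succ_right (by positivity), List.flatMap_append, List.map_append, ih,
      PySem.List.pyRange_one_append 0 (8*(t:Int)) (8*((t:Int)+1)) (by positivity) (by omega)]
    congr 1
    simp only [List.flatMap_cons, List.flatMap_nil, List.append_nil]
    rw [pvKeys_block,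
      show 8*((t:Int)+1) = 8*(t:Int) + 8 from by ring, pvRange8 (8*(t:Int))]
    norm_num
    omega

lemma pvTail_pairwise (n : Int) (hn : 0 < n) :
    (pvTail n).Pairwise (fun a b => pvPriority a < pvPriority b) := by
  rw [← List.pairwise_map (f := pvPriority)]
  unfold pvTail
  dsimp only
  set g : Int := PySem.Int.floordiv (n - 1) 8 with hg
  have hb : g*8 ≤ n - 1 ∧ n - 1 < (g+1)*8 :=
    (PySem.Int.floordiv_eq_iff_of_pos (by norm_num)).1 hg.symm
  have h0 : 0 ≤ g := by omega
  have htg : ((g.toNat : Nat) : Int) = g := Int.toNat_of_nonneg h0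
  rw [List.map_append]
  have hflat : ((PySem.List.pyRange 0 g 1).flatMap pvBlock).map pvPriority =
      PySem.List.pyRange 0 (8*g) 1 := by
    have h := pvKeys_flat g.toNat; rw [htg] at h; exact h
  have hfk : (((pvBase.filter (fun i => decide (g*8+i < n))).map (fun i => g*8+i)).map pvPriority)
      = (pvBase.filter (fun i => decide (g*8+i < n))).map
          (fun i => g*8 + PySem.Dict.getD pvRank i 0) := by
    rw [List.map_map]
    apply List.map_congr_left
    intro i hi
    have hib : i ∈ pvBase := List.mem_of_mem_filter hi
    have h18 : 1 ≤ i ∧ i ≤ 8 := by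
      simp [pvBase] at hib
      rcases hib with h|h|h|h|h|h|h|h <;> omega
    show pvPriority (g*8 + i) = g*8 + PySem.Dict.getD pvRank i 0
    rw [show g*8 + i = i + g*8 from by ring, pvPriority_eq g i h18.1 h18.2]
  rw [hflat, hfk]
  have hsub2 : List.Sublist ((pvBase.filter (fun i => decide (g*8+i < n))).map
        (fun i => g*8 + PySem.Dict.getD pvRank i 0))
      (PySem.List.pyRange (g*8) (g*8+8) 1) := by
    rw [pvRange8 (g*8), ← pvKeys_base g]
    exact List.filter_sublist.map _
  have hsub : List.Sublist (PySem.List.pyRange 0 (8*g) 1 ++ (pvBase.filter (fun i => decide (g*8+i < n))).map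
        (fun i => g*8 + PySem.Dict.getD pvRank i 0)) (PySem.List.pyRange 0 (8*g+8) 1) := by
    rw [PySem.List.pyRange_one_append 0 (8*g) (8*g+8) (by positivity) (by omega),
      show g*8 = 8*g from by ring] at *
    exact List.Sublist.append (List.Sublist.refl _) hsub2
  exact (PySem.List.pairwise_lt_pyRange_one _ _).sublist hsub

-- ===== VERDICT (by name: the statement is the Claim_ definition above) =====
theorem calculate_decompression_order_spec : Claim_equal_calculate_decompression_order := by
  intro n _ hn
  unfold Spec_calculate_decompression_order calculate_decompression_order_alt
  rw [pvA_shape n]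
  exact congrArg (List.cons 0)
    (PySem.List.sorted_eq_of_perm_of_pairwise_lt _ _ pvPriority
      (pvTail_perm n hn) (pvTail_pairwise n hn)).symm
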